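-- pv_equiv track=rewrite | github.com/anurag9601/brocode_challenge | 2025/python/8_august/17_aug.py | coffee
-- ===== SOURCE A (Python) =====
-- def coffee(total_water, coffee_list):
--     small_coffee_req = 200
--     large_coffee_req = 350
--
--     created_coffee = 0
--
--     for coffee in coffee_list:
--         if coffee == "small" and total_water >= small_coffee_req:
--             total_water -= small_coffee_req
--             created_coffee += 1
--         elif coffee == "large" and total_water >= large_coffee_req:
--             total_water -= large_coffee_req
--             created_coffee += 1
--         else:
--             return created_coffee
--     return created_coffee
-- ===== SOURCE B (Python) =====
-- from itertools import accumulate, takewhile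
--
--
-- def coffee(total_water, coffee_list):
--     cost = {"small": 200, "large": 350}
--     costs = [cost[c] for c in takewhile(lambda c: c in cost, coffee_list)]
--     return sum(1 for t in accumulate(costs) if t <= total_water)
-- ===== Notes on version B (the rewrite author's own statement) =====
-- stated objective: alternative
-- what changed: Replaces the stateful stop-on-failure loop by a declarative pipeline: truncate at the first unknown drink, map to costs, take running prefix sums with accumulate, and count how many stay within the water budget (valid because costs are positive, so prefix sums are strictly increasing).
import Mathlib
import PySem

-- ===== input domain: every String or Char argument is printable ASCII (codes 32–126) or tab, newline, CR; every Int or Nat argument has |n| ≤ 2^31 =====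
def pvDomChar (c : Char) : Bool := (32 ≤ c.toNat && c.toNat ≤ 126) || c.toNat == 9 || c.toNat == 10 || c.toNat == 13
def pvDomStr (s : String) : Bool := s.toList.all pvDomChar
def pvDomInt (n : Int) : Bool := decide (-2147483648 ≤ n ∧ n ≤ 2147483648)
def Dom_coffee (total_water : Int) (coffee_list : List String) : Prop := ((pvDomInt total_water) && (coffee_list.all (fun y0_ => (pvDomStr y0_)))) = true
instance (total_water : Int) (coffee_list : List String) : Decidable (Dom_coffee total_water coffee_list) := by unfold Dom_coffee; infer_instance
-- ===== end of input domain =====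

-- B replaces A's stateful stop-on-failure loop by: truncate at first unknown drink, map to
-- costs, take running prefix sums, count those within the budget (an alternative decomposition,
-- same O(n) cost).
-- ===== PORT A =====
def coffeeLoop (total_water : Int) (created_coffee : Int) : List String → Int
  | [] => created_coffee
  | c :: rest =>
    if c == "small" && decide (total_water ≥ 200) then
      coffeeLoop (total_water - 200) (created_coffee + 1) rest
    else if c == "large" && decide (total_water ≥ 350) then
      coffeeLoop (total_water - 350) (created_coffee + 1) rest
    else created_coffee

def coffee (total_water : Int) (coffee_list : List String) : Int :=
  coffeeLoop total_water 0 coffee_list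

-- ===== PORT B =====
-- itertools.accumulate on a list of ints (running sums, no leading zero)
def accumB (a : Int) : List Int → List Int
  | [] => []
  | c :: cs => (a + c) :: accumB (a + c) cs

def costsB (coffee_list : List String) : List Int :=
  (coffee_list.takeWhile (fun c => c == "small" || c == "large")).map
    (fun c => if c == "small" then (200 : Int) else 350)

def coffee_alt (total_water : Int) (coffee_list : List String) : Int :=
  ((accumB 0 (costsB coffee_list)).filter (fun t => decide (t ≤ total_water))).length

-- ===== PRECONDITION & SPEC =====
def Spec_coffee (total_water : Int) (coffee_list : List String) (out : Int) : Prop := out = coffee_alt total_water coffee_list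
instance (total_water : Int) (coffee_list : List String) (out : Int) : Decidable (Spec_coffee total_water coffee_list out) := by unfold Spec_coffee; infer_instance

-- ===== CLAIM (what is proved, stated in full; the proofs are below) =====
def Claim_equal_coffee : Prop := ∀ (total_water : Int) (coffee_list : List String), Dom_coffee total_water coffee_list → Spec_coffee total_water coffee_list (coffee total_water coffee_list)

-- ===== LEMMAS AND PROOFS =====

lemma costsB_small (rest : List String) : costsB ("small"::rest) = 200 :: costsB rest := by
  simp [costsB, List.takeWhile]

lemma costsB_large (rest : List String) : costsB ("large"::rest) = 350 :: costsB rest := by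
  simp [costsB, List.takeWhile]

lemma costsB_other (x : String) (rest : List String) (hs : (x == "small") = false)
    (hl : (x == "large") = false) : costsB (x::rest) = [] := by
  simp [costsB, List.takeWhile, hs, hl]

lemma coffeeLoop_small (tw c : Int) (rest : List String) (h : tw ≥ 200) :
    coffeeLoop tw c ("small"::rest) = coffeeLoop (tw - 200) (c + 1) rest := by
  simp [coffeeLoop, h]

lemma coffeeLoop_large (tw c : Int) (rest : List String) (h : tw ≥ 350) :
    coffeeLoop tw c ("large"::rest) = coffeeLoop (tw - 350) (c + 1) rest := by
  simp [coffeeLoop, h]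

lemma coffeeLoop_shift (tw c : Int) (lst : List String) :
    coffeeLoop tw c lst = c + coffeeLoop tw 0 lst := by
  induction lst generalizing tw c with
  | nil => simp [coffeeLoop]
  | cons x rest ih =>
    simp only [coffeeLoop]
    split_ifs with h1 h2
    · rw [ih, ih (tw - 200) (0 + 1)]; ring
    · rw [ih, ih (tw - 350) (0 + 1)]; ring
    · ring

lemma accumB_none (lst : List String) (a tw : Int) (h : tw < a) :
    (accumB a (costsB lst)).filter (fun t => decide (t ≤ tw)) = [] := by
  induction lst generalizing a with
  | nil => simp [costsB, accumB]
  | cons x rest ih =>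
    by_cases hs : x = "small"
    · subst hs
      rw [costsB_small]
      simp only [accumB, List.filter_cons]
      simp only [decide_eq_false (show ¬(a + 200 ≤ tw) from by omega), Bool.false_eq_true,
        if_false]
      exact ih (a + 200) (by omega)
    · by_cases hl : x = "large"
      · subst hl
        rw [costsB_large]
        simp only [accumB, List.filter_cons]
        simp only [decide_eq_false (show ¬(a + 350 ≤ tw) from by omega), Bool.false_eq_true,
          if_false]
        exact ih (a + 350) (by omega)
      · rw [costsB_other x rest (by simpa using hs) (by simpa using hl)]
        simp [accumB]

lemma key (lst : List String) (a tw : Int) :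
    (((accumB a (costsB lst)).filter (fun t => decide (t ≤ tw))).length : Int)
      = coffeeLoop (tw - a) 0 lst := by
  induction lst generalizing a with
  | nil => simp [costsB, accumB, coffeeLoop]
  | cons x rest ih =>
    by_cases hs : x = "small"
    · subst hs
      by_cases hle : a + 200 ≤ tw
      · rw [costsB_small]
        simp only [accumB, List.filter_cons, decide_eq_true hle, if_true, List.length_cons]
        rw [coffeeLoop_small _ _ _ (by omega), coffeeLoop_shift,
          show tw - a - 200 = tw - (a + 200) from by ring, ← ih (a + 200)]
        push_cast
        ring
      · rw [costsB_small]
        simp only [accumB, List.filter_cons]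
        simp only [decide_eq_false hle, Bool.false_eq_true, if_false]
        rw [accumB_none rest (a + 200) tw (by omega)]
        simp [coffeeLoop, show ¬(tw - a ≥ 200) from by omega]
    · by_cases hl : x = "large"
      · subst hl
        by_cases hle : a + 350 ≤ tw
        · rw [costsB_large]
          simp only [accumB, List.filter_cons, decide_eq_true hle, if_true, List.length_cons]
          rw [coffeeLoop_large _ _ _ (by omega), coffeeLoop_shift,
            show tw - a - 350 = tw - (a + 350) from by ring, ← ih (a + 350)]
          push_cast
          ring
        · rw [costsB_large]
          simp only [accumB, List.filter_cons]
          simp only [decide_eq_false hle, Bool.false_eq_true, if_false]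
          rw [accumB_none rest (a + 350) tw (by omega)]
          simp [coffeeLoop, show ¬(tw - a ≥ 350) from by omega]
      · have hbs : (x == "small") = false := by simpa using hs
        have hbl : (x == "large") = false := by simpa using hl
        rw [costsB_other x rest hbs hbl]
        simp [accumB, coffeeLoop, hbs, hbl]

-- ===== VERDICT =====
theorem coffee_spec : Claim_equal_coffee := by
  intro tw lst _
  unfold Spec_coffee coffee coffee_alt
  have := key lst 0 tw
  simp only [sub_zero] at this
  omega
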